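-- pv_equiv track=rewrite | github.com/davidzlu/CoCoSci-URAP2015 | Markov.py | create_states
-- ===== SOURCE A (Python) =====
-- import string
--
-- digs = string.digits
--
-- def int2base(x, base):
-- 	"""Code which converts an integer into a string in base x
-- 	Adapted from http://stackoverflow.com/a/2267446
-- 	Meant as an inverse of the built in function int(x, base)"""
-- 	if x < 0:
-- 		sign = -1
-- 	elif x == 0:
-- 		return digs[0]
-- 	else:
-- 		sign = 1
-- 	x *= sign
-- 	digits = []
-- 	while x:
-- 		digits.append(digs[x % base])
-- 		x = x//base
-- 	if sign < 0:
-- 		digits.append('-')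
-- 	digits.reverse()
-- 	return ''.join(digits)
--
-- def create_states(numpieces=3, boardsize=4):
-- 	"""
-- 	Returns a list of all possible states represented as bit strings where
-- 	string indexes correspond to spaces on the board like so:
--     0 = [0,0] 1 = [0,1]
--     2 = [1,0] 3 = [1,1]
--
-- 	numpieces: Number of configurations a particular space can take,
-- 			   including the null configuration.
-- 	boardsize: Number of spaces on the gameboard
-- 	"""
-- 	total = numpieces**boardsize
-- 	states = []
-- 	for i in range(0, total):
-- 		state = int2base(i,numpieces)
-- 		if len(state) < boardsize:
-- 			state = (str(0)*(boardsize - len(state))) + state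
-- 		states.append(state)
-- 	return states
-- ===== SOURCE B (Python) =====
-- import string
--
-- digs = string.digits
--
-- def create_states(numpieces=3, boardsize=4):
--     """Odometer enumeration: grow all boards one space at a time, appending every
--     possible digit on the right, so states come out in counting order already
--     padded to the board size."""
--     states = ['']
--     for _ in range(boardsize):
--         states = [s + digs[d] for s in states for d in range(numpieces)]
--     return states
-- ===== Notes on version B (the rewrite author's own statement) =====
-- stated objective: alternative
-- what changed: Replaces the count-to-numpieces**boardsize loop with its per-integer int2base conversion and zero-padding by an odometer-style cartesian expansion that appends one digit per board space, producing the padded strings directly in the same counting order; Pre_ excludes boardsize < 0 (A raises TypeError), numpieces >= 11 with boardsize >= 1 (A raises IndexError on digs[10]), and numpieces < 0 with positive even boardsize, where A's returned strings come from accidental negative-index wraparound into digs.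
-- intended difference: For boardsize == 0 A returns ['0'] because int2base(0) yields '0' and padding never shrinks a string, while B returns [''], the single empty board, which is the intended enumeration of the states of a 0-space board. — e.g. on create_states(3, 0): A returns ["0"], B returns [""]
-- outside the precondition, e.g. on create_states(-2, 2): A returns ['00', '99', '90', '9909'], B returns []; on create_states(-1, 2): A returns ['00'], B returns []
import Mathlib
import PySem

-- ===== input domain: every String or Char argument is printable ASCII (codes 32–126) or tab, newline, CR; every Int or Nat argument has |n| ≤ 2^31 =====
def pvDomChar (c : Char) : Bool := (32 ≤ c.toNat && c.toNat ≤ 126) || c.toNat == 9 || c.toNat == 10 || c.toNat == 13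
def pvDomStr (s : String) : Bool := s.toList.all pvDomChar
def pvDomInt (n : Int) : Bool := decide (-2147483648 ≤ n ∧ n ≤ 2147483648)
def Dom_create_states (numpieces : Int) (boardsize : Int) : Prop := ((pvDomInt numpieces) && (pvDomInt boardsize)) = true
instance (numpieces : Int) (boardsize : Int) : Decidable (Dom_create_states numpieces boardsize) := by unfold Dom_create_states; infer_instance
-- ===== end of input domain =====

-- B replaces the count-then-int2base-and-pad loop by an odometer-style cartesian
-- expansion appending one digit per board space (alternative algorithm of the same
-- cost; for boardsize = 0 the intended [""] is returned instead of A's ["0"]).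


-- ===== PORT A =====
-- digs = string.digits, as its list of characters
def digsList : List Char := ['0', '1', '2', '3', '4', '5', '6', '7', '8', '9']

-- digs[i] (inside Pre_ every index used is in range, so the .getD default is never reached)
def digsGet (i : Int) : Char := (PySem.List.pyGet? digsList i).getD ' '

-- the 'while x:' loop of int2base; fuel = x+1 suffices wherever the Python loop terminates
def int2baseLoop : Nat → Int → Int → List Char → List Char
  | 0, _, _, digits => digits
  | fuel+1, x, base, digits =>
    if x = 0 then digits
    else int2baseLoop fuel (PySem.Int.floordiv x base) base (digits ++ [digsGet (PySem.Int.mod x base)])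

def int2base (x base : Int) : String :=
  if x < 0 then
    String.ofList ((int2baseLoop ((-x).toNat + 1) (-x) base []) ++ ['-']).reverse
  else if x = 0 then "0"
  else String.ofList (int2baseLoop (x.toNat + 1) x base []).reverse

-- the padding step: if len(state) < boardsize: state = str(0)*(boardsize-len(state)) + state
def padState (boardsize : Int) (state : String) : String :=
  if PySem.Str.len state < boardsize then
    String.ofList (List.replicate (boardsize - PySem.Str.len state).toNat '0') ++ state
  else state

def create_states (numpieces : Int) (boardsize : Int) : List String :=
  (PySem.List.pyRange 0 (numpieces ^ boardsize.toNat) 1).foldl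
    (fun states i => states ++ [padState boardsize (int2base i numpieces)]) []

-- ===== PORT B =====
-- one pass of the expansion: states = [s + digs[d] for s in states for d in range(numpieces)]
def stepB (numpieces : Int) (states : List String) : List String :=
  states.flatMap (fun s =>
    (PySem.List.pyRange 0 numpieces 1).map (fun d => s ++ String.ofList [digsGet d]))

def create_states_alt (numpieces : Int) (boardsize : Int) : List String :=
  (List.range boardsize.toNat).foldl (fun states _ => stepB numpieces states) [""]

-- ===== PRECONDITION & SPEC =====
-- Pre_ excludes: boardsize < 0 (Python A raises TypeError on range of a float);
-- numpieces ≥ 11 with boardsize ≥ 1 (A raises IndexError on digs[10]); and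
-- numpieces < 0 with positive even boardsize, outside the natural domain of a piece
-- count, where A's returned strings come from accidental negative-index wraparound
-- into digs (with odd or zero boardsize A's value is matched and stays inside Pre_).
def Pre_create_states (numpieces : Int) (boardsize : Int) : Prop :=
  0 ≤ boardsize ∧
    (boardsize = 0 ∨ (numpieces ≤ 10 ∧ (0 ≤ numpieces ∨ boardsize % 2 = 1)))
instance (numpieces : Int) (boardsize : Int) : Decidable (Pre_create_states numpieces boardsize) := by
  unfold Pre_create_states; infer_instance

def pvWitness_create_states : Int × Int := (3, 2)

-- For boardsize = 0, A returns ["0"] (int2base(0) = "0" is never padded down), while B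
-- returns [""], the single empty board — the intended enumeration of a 0-space board.
def D_create_states (numpieces : Int) (boardsize : Int) : Prop := boardsize = 0
instance (numpieces : Int) (boardsize : Int) : Decidable (D_create_states numpieces boardsize) := by
  unfold D_create_states; infer_instance

def Spec_create_states (numpieces : Int) (boardsize : Int) (out : List String) : Prop :=
  ¬ D_create_states numpieces boardsize → out = create_states_alt numpieces boardsize
instance (numpieces : Int) (boardsize : Int) (out : List String) : Decidable (Spec_create_states numpieces boardsize out) := by unfold Spec_create_states; infer_instance

def pvDiffWitness_create_states : Int × Int := (3, 0)
def pvDiffWitnessOut_create_states : (List String) × (List String) := (["0"], [""])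

-- ===== CLAIM (what is proved, stated in full; the proofs are below) =====
def Claim_unchanged_create_states : Prop := ∀ (numpieces : Int) (boardsize : Int), Dom_create_states numpieces boardsize → Pre_create_states numpieces boardsize → Spec_create_states numpieces boardsize (create_states numpieces boardsize)
def Claim_changed_create_states : Prop := Dom_create_states (pvDiffWitness_create_states.1) (pvDiffWitness_create_states.2) ∧ Pre_create_states (pvDiffWitness_create_states.1) (pvDiffWitness_create_states.2) ∧ D_create_states (pvDiffWitness_create_states.1) (pvDiffWitness_create_states.2) ∧ create_states (pvDiffWitness_create_states.1) (pvDiffWitness_create_states.2) = pvDiffWitnessOut_create_states.1 ∧ create_states_alt (pvDiffWitness_create_states.1) (pvDiffWitness_create_states.2) = pvDiffWitnessOut_create_states.2 ∧ pvDiffWitnessOut_create_states.1 ≠ pvDiffWitnessOut_create_states.2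
def Claim_exact_create_states : Prop := ∀ (numpieces : Int) (boardsize : Int), Dom_create_states numpieces boardsize → Pre_create_states numpieces boardsize → D_create_states numpieces boardsize → create_states numpieces boardsize ≠ create_states_alt numpieces boardsize

-- ===== LEMMAS AND PROOFS =====

theorem pv_ediv_lt (x base : Int) (h : 1 ≤ x) (hb : 2 ≤ base) : x / base < x := by
  rw [Int.ediv_lt_iff_lt_mul (by omega)]
  nlinarith

-- the loop accumulator only ever grows on the right
theorem loop_acc (fuel : Nat) : ∀ (x base : Int) (ds : List Char),
    int2baseLoop fuel x base ds = ds ++ int2baseLoop fuel x base [] := by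
  induction fuel with
  | zero => intro x base ds; simp [int2baseLoop]
  | succ f ih =>
    intro x base ds
    by_cases hx : x = 0
    · simp [int2baseLoop, hx]
    · simp only [int2baseLoop, if_neg hx]
      rw [ih (PySem.Int.floordiv x base) base (ds ++ [digsGet (PySem.Int.mod x base)]),
          ih (PySem.Int.floordiv x base) base ([] ++ [digsGet (PySem.Int.mod x base)])]
      simp

-- fuel irrelevance (0 ≤ x, 2 ≤ base)
theorem loop_fuel (f1 : Nat) : ∀ (f2 : Nat) (x base : Int), 0 ≤ x → 2 ≤ base →
    x.toNat < f1 → x.toNat < f2 →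
    int2baseLoop f1 x base [] = int2baseLoop f2 x base [] := by
  induction f1 with
  | zero => intro f2 x base _ _ h1 _; omega
  | succ f ih =>
    intro f2 x base hx hb h1 h2
    cases f2 with
    | zero => omega
    | succ g =>
      by_cases hx0 : x = 0
      · simp [int2baseLoop, hx0]
      · have hdiv : PySem.Int.floordiv x base = x / base :=
          PySem.Int.floordiv_eq_ediv_of_pos (by omega)
        have hlt : x / base < x := pv_ediv_lt x base (by omega) hb
        have hge : 0 ≤ x / base := Int.ediv_nonneg hx (by omega)
        simp only [int2baseLoop, if_neg hx0]
        rw [loop_acc f, loop_acc g, hdiv]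
        rw [ih g (x / base) base hge hb (by omega) (by omega)]

theorem loop_zero (fuel : Nat) (base : Int) (ds : List Char) :
    int2baseLoop fuel 0 base ds = ds := by
  cases fuel <;> simp [int2baseLoop]

-- digits of x in [1, base): a single digit
theorem int2base_small (x base : Int) (h1 : 1 ≤ x) (h2 : x < base) :
    (int2base x base).toList = [digsGet x] := by
  have hx : ¬ x < 0 := by omega
  have hx0 : ¬ x = 0 := by omega
  have hdiv : PySem.Int.floordiv x base = 0 := by
    rw [PySem.Int.floordiv_eq_ediv_of_pos (by omega)]
    exact Int.ediv_eq_zero_of_lt (by omega) h2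
  have hmod : PySem.Int.mod x base = x := by
    rw [PySem.Int.mod_eq_emod_of_pos (by omega)]
    exact Int.emod_eq_of_lt (by omega) h2
  simp only [int2base, if_neg hx, if_neg hx0, int2baseLoop, hdiv, hmod]
  rw [loop_zero]
  simp

-- peeling the least significant digit for x ≥ base ≥ 2
theorem int2base_step (x base : Int) (hb : 2 ≤ base) (hx : base ≤ x) :
    (int2base x base).toList =
      (int2base (PySem.Int.floordiv x base) base).toList ++ [digsGet (PySem.Int.mod x base)] := by
  have hx0 : ¬ x = 0 := by omega
  have hxneg : ¬ x < 0 := by omega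
  have hdiv : PySem.Int.floordiv x base = x / base :=
    PySem.Int.floordiv_eq_ediv_of_pos (by omega)
  have hq1 : 1 ≤ x / base := by
    rw [Int.le_ediv_iff_mul_le (by omega)]; omega
  have hqlt : x / base < x := pv_ediv_lt x base (by omega) hb
  have hqneg : ¬ x / base < 0 := by omega
  have hq0 : ¬ x / base = 0 := by omega
  rw [hdiv]
  simp only [int2base, if_neg hxneg, if_neg hx0, if_neg hqneg, if_neg hq0]
  simp only [int2baseLoop, if_neg hx0, hdiv]
  rw [loop_acc]
  rw [loop_fuel x.toNat ((x / base).toNat + 1) (x / base) base (by omega) hb (by omega) (by omega)]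
  simp only [int2baseLoop, if_neg hq0]
  simp

-- padState at the character-list level (uniform formula, both branches)
theorem padState_toList (b : Int) (s : String) :
    (padState b s).toList = List.replicate (b - (s.toList.length : Int)).toNat '0' ++ s.toList := by
  unfold padState
  by_cases h : PySem.Str.len s < b
  · rw [if_pos h]
    simp [PySem.Str.len_eq]
  · rw [if_neg h]
    have h0 : (b - (s.toList.length : Int)).toNat = 0 := by
      simp only [PySem.Str.len_eq] at h
      omega
    rw [h0]
    simp

-- proof-side views of the two programs ------------------------------------------

-- gDigits n k = the characters of int2base(k, n)
def gDigits (n : Int) (k : Nat) : List Char := (int2base (k : Int) n).toList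

-- Fl n b k = the padded state A appends for index k, as a character list
def Fl (n : Int) (b k : Nat) : List Char :=
  List.replicate ((b : Int) - ((gDigits n k).length : Int)).toNat '0' ++ gDigits n k

-- Ee n bn = B's state list after bn expansion passes
def Ee (n : Int) (bn : Nat) : List String :=
  (List.range bn).foldl (fun states _ => stepB n states) [""]

theorem gDigits_zero (n : Int) : gDigits n 0 = ['0'] := by
  simp [gDigits, int2base]

theorem digsGet_zero : digsGet 0 = '0' := by decide

theorem Fl_zero (n : Int) (b : Nat) (hb : 1 ≤ b) :
    Fl n b 0 = List.replicate b '0' := by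
  unfold Fl
  rw [gDigits_zero]
  have h1 : (((['0'] : List Char).length : Nat) : Int) = 1 := by simp
  rw [h1]
  have h2 : ((b : Int) - 1).toNat = b - 1 := by omega
  rw [h2]
  have h3 : b = (b - 1) + 1 := by omega
  conv_rhs => rw [h3, List.replicate_succ']

theorem Fl_one (N k : Nat) (hk : k < N) : Fl (N : Int) 1 k = [digsGet (k : Int)] := by
  by_cases hk0 : k = 0
  · subst hk0
    rw [Fl_zero _ _ le_rfl]
    simp [digsGet_zero]
  · unfold Fl
    rw [show gDigits (N : Int) k = [digsGet (k : Int)] from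
      int2base_small _ _ (by exact_mod_cast Nat.one_le_iff_ne_zero.mpr hk0) (by exact_mod_cast hk)]
    simp

-- the key digit lemma: A's padded state for q*N+r is the one for q with digit r appended
theorem Fl_step (N b q r : Nat) (hb : 1 ≤ b) (hq : q < N ^ b) (hr : r < N) :
    Fl (N : Int) (b + 1) (q * N + r) = Fl (N : Int) b q ++ [digsGet (r : Int)] := by
  by_cases hq0 : q = 0
  · subst hq0
    simp only [Nat.zero_mul, Nat.zero_add]
    by_cases hr0 : r = 0
    · subst hr0
      rw [Fl_zero _ _ (by omega), Fl_zero _ _ hb, List.replicate_succ']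
      simp [digsGet_zero]
    · rw [Fl_zero _ _ hb]
      unfold Fl
      rw [show gDigits (N : Int) r = [digsGet (r : Int)] from
        int2base_small _ _ (by exact_mod_cast Nat.one_le_iff_ne_zero.mpr hr0) (by exact_mod_cast hr)]
      have h1 : ((((b + 1 : Nat) : Int)) - ((([digsGet (r : Int)] : List Char).length : Nat) : Int)).toNat = b := by
        simp only [List.length_cons, List.length_nil]
        omega
      rw [h1]
  · -- q ≥ 1, hence N ≥ 2 and q*N + r ≥ N
    have hN2 : 2 ≤ N := by
      rcases N with _ | _ | n
      · omega
      · rw [Nat.one_pow] at hq; omega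
      · omega
    have hk : N ≤ q * N + r := by
      have : 1 * N ≤ q * N := Nat.mul_le_mul_right N (by omega)
      omega
    have hdivN : (q * N + r) / N = q := by
      have h1 : q * N + r = N * q + r := by ring
      rw [h1, Nat.mul_add_div (by omega), Nat.div_eq_of_lt hr]
      omega
    have hmodN : (q * N + r) % N = r := by
      have h1 : q * N + r = N * q + r := by ring
      rw [h1, Nat.mul_add_mod, Nat.mod_eq_of_lt hr]
    have hdiv : PySem.Int.floordiv ((q * N + r : Nat) : Int) (N : Int) = (q : Int) := by
      rw [PySem.Int.floordiv_natCast, hdivN]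
    have hmod : PySem.Int.mod ((q * N + r : Nat) : Int) (N : Int) = (r : Int) := by
      rw [PySem.Int.mod_natCast, hmodN]
    have hstep := int2base_step ((q * N + r : Nat) : Int) (N : Int)
      (by exact_mod_cast hN2) (by exact_mod_cast hk)
    rw [hdiv, hmod] at hstep
    unfold Fl
    rw [show gDigits (N : Int) (q * N + r) = gDigits (N : Int) q ++ [digsGet (r : Int)] from hstep]
    have hL : (((gDigits (N : Int) q ++ [digsGet (r : Int)]).length : Nat) : Int)
        = (((gDigits (N : Int) q).length : Nat) : Int) + 1 := by simp
    rw [hL]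
    have h2 : (((b + 1 : Nat) : Int)) - ((((gDigits (N : Int) q).length : Nat) : Int) + 1)
        = (b : Int) - (((gDigits (N : Int) q).length : Nat) : Int) := by push_cast; ring
    rw [h2, List.append_assoc]

-- cartesian decomposition of a product range
theorem map_range_mul {α : Type} (M K : Nat) (f : Nat → α) :
    (List.range (M * K)).map f
      = (List.range M).flatMap (fun q => (List.range K).map (fun r => f (q * K + r))) := by
  induction M with
  | zero => simp
  | succ m ih =>
    rw [Nat.succ_mul, List.range_add, List.map_append, ih, List.range_succ, List.flatMap_append]
    simp [List.map_map, Function.comp, Nat.add_comm]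

-- flatMap congruence on members
theorem pvFlatMapCongr {α β : Type} (l : List α) (f g : α → List β)
    (h : ∀ x ∈ l, f x = g x) : l.flatMap f = l.flatMap g := by
  induction l with
  | nil => rfl
  | cons a t ih =>
    simp only [List.flatMap_cons]
    rw [h a (by simp), ih (fun x hx => h x (by simp [hx]))]

-- one more expansion pass
theorem Ee_succ (n : Int) (bn : Nat) : Ee n (bn + 1) = stepB n (Ee n bn) := by
  unfold Ee
  rw [List.range_succ, List.foldl_append]
  simp

-- B's inner comprehension over a mapped state list
theorem stepB_map (N : Nat) (l : List Nat) (h : Nat → List Char) :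
    stepB (N : Int) (l.map (fun q => String.ofList (h q)))
      = l.flatMap (fun q => (List.range N).map (fun (r : Nat) => String.ofList (h q ++ [digsGet (r : Int)]))) := by
  unfold stepB
  rw [List.flatMap_map]
  apply pvFlatMapCongr
  intro q _
  rw [PySem.List.pyRange_one]
  simp only [sub_zero, Int.toNat_natCast, zero_add, List.map_map]
  apply List.map_congr_left
  intro r _
  simp

-- the core equivalence: after bn ≥ 1 passes, B's list is A's list of padded states
theorem core (N : Nat) : ∀ bn : Nat, 1 ≤ bn →
    (List.range (N ^ bn)).map (fun k => String.ofList (Fl (N : Int) bn k)) = Ee (N : Int) bn := by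
  intro bn
  induction bn with
  | zero => omega
  | succ b ih =>
    intro _
    by_cases hb0 : b = 0
    · subst hb0
      have h1 : Ee (N : Int) 1 = stepB (N : Int) [""] := by
        unfold Ee
        simp
      rw [h1]
      unfold stepB
      rw [PySem.List.pyRange_one]
      simp only [pow_one, zero_add, sub_zero, Int.toNat_natCast, List.flatMap_cons,
        List.flatMap_nil, List.append_nil, List.map_map]
      apply List.map_congr_left
      intro k hk
      rw [List.mem_range] at hk
      simp only [Function.comp_apply]
      rw [Fl_one N k hk]
      simp
    · have hb1 : 1 ≤ b := by omega
      rw [pow_succ, map_range_mul, Ee_succ, ← ih hb1,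
        stepB_map N (List.range (N ^ b)) (fun q => Fl (N : Int) b q)]
      apply pvFlatMapCongr
      intro q hq
      rw [List.mem_range] at hq
      apply List.map_congr_left
      intro r hr
      rw [List.mem_range] at hr
      exact congrArg String.ofList (Fl_step N b q r hb1 hq hr)

-- A's fold is the map of padded states
theorem createA_eq (N bn : Nat) :
    create_states (N : Int) (bn : Int)
      = (List.range (N ^ bn)).map (fun k => String.ofList (Fl (N : Int) bn k)) := by
  unfold create_states
  have h1 : ((bn : Int)).toNat = bn := by omega
  have h2 : ((N : Int) ^ bn) = ((N ^ bn : Nat) : Int) := by push_cast; ring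
  rw [h1, h2, PySem.List.foldl_append_singleton_eq_map, PySem.List.pyRange_one]
  have h3 : (((N ^ bn : Nat) : Int) - 0).toNat = N ^ bn := by omega
  rw [h3, List.map_map, List.nil_append]
  apply List.map_congr_left
  intro k _
  simp only [Function.comp_apply, zero_add]
  apply String.toList_inj.mp
  rw [padState_toList]
  simp [Fl, gDigits]

-- the expansion collapses to [] as soon as the digit range is empty
theorem Ee_empty (n : Int) (hn : n ≤ 0) : ∀ bn : Nat, 1 ≤ bn → Ee n bn = [] := by
  intro bn
  induction bn with
  | zero => omega
  | succ b ih =>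
    intro _
    by_cases hb0 : b = 0
    · subst hb0
      show Ee n 1 = []
      unfold Ee
      simp [stepB, PySem.List.pyRange_one_eq_nil hn]
    · rw [Ee_succ, ih (by omega)]
      rfl

-- ===== VERDICT (by name: the statement is the Claim_ definition above) =====
theorem create_states_spec : Claim_unchanged_create_states := by
  intro numpieces boardsize _ hpre
  obtain ⟨hb, hrest⟩ := hpre
  intro hD
  unfold D_create_states at hD
  obtain ⟨bn, rfl⟩ := Int.eq_ofNat_of_zero_le hb
  have hbz : bn ≠ 0 := fun h => hD (by simp [h])
  have hb1 : 1 ≤ bn := by omega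
  rcases hrest with hbz' | ⟨_, hcase⟩
  · exact absurd (by exact_mod_cast hbz' : bn = 0) hbz
  · by_cases hn0 : 0 ≤ numpieces
    · obtain ⟨N, rfl⟩ := Int.eq_ofNat_of_zero_le hn0
      rw [createA_eq, core N bn hb1]
      unfold create_states_alt
      unfold Ee
      rw [Int.toNat_natCast]
    · -- numpieces < 0 and boardsize odd: both enumerations are empty
      have hodd : bn % 2 = 1 := by
        rcases hcase with h | h
        · exact absurd h hn0
        · omega
      have hneg : numpieces ^ bn < 0 :=
        Odd.pow_neg (Nat.odd_iff.mpr hodd) (by omega)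
      have hA : create_states numpieces (bn : Int) = [] := by
        unfold create_states
        rw [Int.toNat_natCast, PySem.List.pyRange_one_eq_nil (by omega)]
        rfl
      have hB : create_states_alt numpieces (bn : Int) = [] := by
        unfold create_states_alt
        rw [Int.toNat_natCast]
        exact Ee_empty numpieces (by omega) bn hb1
      rw [hA, hB]

theorem create_states_changed : Claim_changed_create_states := by
  unfold Claim_changed_create_states; decide

theorem create_states_tight : Claim_exact_create_states := by
  intro numpieces boardsize _ _ hD
  unfold D_create_states at hD
  subst hD
  have hA : create_states numpieces 0 = ["0"] := by
    unfold create_states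
    rw [PySem.List.pyRange_one]
    simp [padState, int2base, PySem.Str.len_eq]
  have hB : create_states_alt numpieces 0 = [""] := by
    unfold create_states_alt
    simp
  rw [hA, hB]
  decide
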